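-- pv_equiv track=rewrite | github.com/jojowither/Joint_Entity_and_Relation_Extraction | process_ADE.py | addBILOU
-- ===== SOURCE A (Python) =====
-- def addBILOU(e_seq, index, e_type):
--
--     for i, idx in enumerate(index):
--
--         if len(index)==1:
--             e_seq[idx] = 'U-'+ e_type
--
--         elif i==0:
--             e_seq[idx] = 'B-'+ e_type
--
--         elif i+1==len(index):
--             e_seq[idx] = 'L-'+ e_type
--
--         else:
--             e_seq[idx] = 'I-'+ e_type
--
--     return e_seq
-- ===== SOURCE B (Python) =====
-- def addBILOU(e_seq, index, e_type):
--     n = len(index)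
--     if n == 1:
--         pattern = ['U']
--     elif n >= 2:
--         pattern = ['B'] + ['I'] * (n - 2) + ['L']
--     else:
--         pattern = []
--     for idx, t in zip(index, pattern):
--         e_seq[idx] = t + '-' + e_type
--     return e_seq
-- ===== Notes on version B (the rewrite author's own statement) =====
-- stated objective: simpler
-- what changed: B precomputes the whole BILOU letter pattern for the span length up front and then does one uniform zip-assignment pass, instead of re-testing the position against three boundary conditions inside the loop.
import Mathlib
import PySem

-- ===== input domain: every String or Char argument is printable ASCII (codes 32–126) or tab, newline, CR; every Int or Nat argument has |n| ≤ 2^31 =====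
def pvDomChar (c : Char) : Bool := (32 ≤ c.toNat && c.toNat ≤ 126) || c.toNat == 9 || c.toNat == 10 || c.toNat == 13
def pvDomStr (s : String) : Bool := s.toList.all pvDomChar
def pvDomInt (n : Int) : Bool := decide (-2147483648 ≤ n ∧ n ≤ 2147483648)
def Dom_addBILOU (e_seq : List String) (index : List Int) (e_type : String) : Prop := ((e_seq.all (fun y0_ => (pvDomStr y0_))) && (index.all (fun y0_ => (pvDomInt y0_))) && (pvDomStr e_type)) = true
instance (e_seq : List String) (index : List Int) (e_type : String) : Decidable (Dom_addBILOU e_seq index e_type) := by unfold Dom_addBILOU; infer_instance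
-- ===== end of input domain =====

-- B precomputes the BILOU letter pattern for the span length and assigns it in one uniform
-- zip pass, instead of A's per-element boundary branching (objective: simpler).
-- Both Pythons mutate e_seq in place the same way; the equivalence is about the returned list.

-- ===== PORT A =====
def addBILOU (e_seq : List String) (index : List Int) (e_type : String) : List String :=
  (PySem.List.enumerate index).foldl
    (fun s p =>
      if index.length = 1 then PySem.List.pySetD s p.2 ("U-" ++ e_type)
      else if p.1 = 0 then PySem.List.pySetD s p.2 ("B-" ++ e_type)
      else if p.1 + 1 = (index.length : Int) then PySem.List.pySetD s p.2 ("L-" ++ e_type)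
      else PySem.List.pySetD s p.2 ("I-" ++ e_type))
    e_seq

-- ===== PORT B =====
def biloPattern (n : Nat) : List String :=
  if n = 1 then ["U"]
  else if 2 ≤ n then "B" :: (List.replicate (n - 2) "I" ++ ["L"])
  else []

def addBILOU_alt (e_seq : List String) (index : List Int) (e_type : String) : List String :=
  (index.zip (biloPattern index.length)).foldl
    (fun s p => PySem.List.pySetD s p.1 ((p.2 ++ "-") ++ e_type)) e_seq

-- ===== PRECONDITION & SPEC =====
-- Pre_ excludes exactly the inputs where Python A raises IndexError: some index out of range of e_seq.
def Pre_addBILOU (e_seq : List String) (index : List Int) (e_type : String) : Prop :=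
  ∀ i ∈ index, PySem.Raise.InRange e_seq.length i
instance (e_seq : List String) (index : List Int) (e_type : String) : Decidable (Pre_addBILOU e_seq index e_type) := by unfold Pre_addBILOU; infer_instance

def pvWitness_addBILOU : List String × List Int × String := (["O", "O", "O"], [0, 1, 2], "Drug")

def Spec_addBILOU (e_seq : List String) (index : List Int) (e_type : String) (out : List String) : Prop := out = addBILOU_alt e_seq index e_type
instance (e_seq : List String) (index : List Int) (e_type : String) (out : List String) : Decidable (Spec_addBILOU e_seq index e_type out) := by unfold Spec_addBILOU; infer_instance

-- ===== CLAIM (what is proved, stated in full; the proofs are below) =====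
def Claim_equal_addBILOU : Prop := ∀ (e_seq : List String) (index : List Int) (e_type : String), Dom_addBILOU e_seq index e_type → Pre_addBILOU e_seq index e_type → Spec_addBILOU e_seq index e_type (addBILOU e_seq index e_type)

-- ===== LEMMAS AND PROOFS =====

theorem length_biloPattern (n : Nat) : (biloPattern n).length = n := by
  unfold biloPattern; split_ifs <;> simp <;> omega

-- pointwise congruence of two folds over equal-length lists
theorem foldl_congr_pt {α β γ : Type} (f : γ → α → γ) (g : γ → β → γ) :
    ∀ (l1 : List α) (l2 : List β), l1.length = l2.length →
    (∀ (k : Nat) (h1 : k < l1.length) (h2 : k < l2.length) (s : γ), f s l1[k] = g s l2[k]) →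
    ∀ s : γ, l1.foldl f s = l2.foldl g s
  | [], [], _, _, s => rfl
  | a :: l1, b :: l2, h, hk, s => by
      have h0 : f s a = g s b := by simpa using hk 0 (by simp) (by simp) s
      rw [List.foldl_cons, List.foldl_cons, h0]
      exact foldl_congr_pt f g l1 l2 (by simpa using h)
        (fun k h1 h2 s => by simpa using hk (k + 1) (by simpa using h1) (by simpa using h2) s) _

theorem biloPattern_get (n k : Nat) (hk : k < n) :
    (biloPattern n)[k]'(by rw [length_biloPattern]; exact hk) =
      if n = 1 then "U" else if k = 0 then "B" else if k + 1 = n then "L" else "I" := by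
  unfold biloPattern
  by_cases h1 : n = 1
  · subst h1; interval_cases k; simp
  · have h2 : 2 ≤ n := by omega
    simp only [h1, if_false, h2, if_true]
    rcases Nat.eq_zero_or_pos k with hk0 | hk0
    · subst hk0; simp
    · by_cases hL : k + 1 = n
      · have hge : ¬ (k - 1 < (List.replicate (n - 2) ("I" : String)).length) := by simp; omega
        rw [List.getElem_cons, dif_neg hk0.ne', List.getElem_append_right (by simpa using hge)]
        simp [hk0.ne', hL]
      · have hlt : k - 1 < (List.replicate (n - 2) ("I" : String)).length := by simp; omega
        rw [List.getElem_cons, dif_neg hk0.ne', List.getElem_append_left hlt,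
          List.getElem_replicate]
        simp [hk0.ne', hL]

-- ===== VERDICT (by name: the statement is the Claim_ definition above) =====
theorem addBILOU_spec : Claim_equal_addBILOU := by
  intro e_seq index e_type _dom _pre
  unfold Spec_addBILOU addBILOU addBILOU_alt
  refine (foldl_congr_pt _ _ _ _ ?_ ?_ e_seq).symm
  · simp [length_biloPattern, PySem.List.length_enumerate]
  · intro k h1 h2 s
    have hkn : k < index.length := by simpa [PySem.List.length_enumerate] using h2
    rw [PySem.List.getElem_enumerate, List.getElem_zip]
    rw [biloPattern_get index.length k hkn]
    have hInt0 : ((0 : Int) + (k : Nat) = 0) ↔ k = 0 := by omega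
    have hInt1 : ((0 : Int) + (k : Nat) + 1 = (index.length : Int)) ↔ k + 1 = index.length := by
      omega
    simp only [hInt0, hInt1]
    have hU : ("U" ++ "-" : String) = "U-" := rfl
    have hB : ("B" ++ "-" : String) = "B-" := rfl
    have hL : ("L" ++ "-" : String) = "L-" := rfl
    have hI : ("I" ++ "-" : String) = "I-" := rfl
    by_cases e1 : index.length = 1
    · simp [e1, hU]
    · by_cases e0 : k = 0
      · simp [e1, e0, hB]
      · by_cases eL : k + 1 = index.length
        · simp [e1, e0, eL, hL]
        · simp [e1, e0, eL, hI]
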